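-- pv_equiv track=rewrite | github.com/yananfei-Bette/Leetcode | amazonOA/MaximumMinimumPaths.py | MaxMinPath
-- ===== SOURCE A (Python) =====
-- def MaxMinPath(matrix):
-- 	res = [0] * len(matrix[0])
-- 	res[0] = matrix[0][0]
-- 	for i in range(1, len(matrix[0])):
-- 		res[i] = min(res[i - 1], matrix[0][i])
--
-- 	for i in range(1, len(matrix)):
-- 		res[0] = min(matrix[i][0], res[0])
-- 		for j in range(1, len(matrix[0])):
-- 			if res[j] < matrix[i][j] and res[j - 1] < matrix[i][j]:
-- 				res[j] = max(res[j], res[j - 1])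
-- 			else:
-- 				res[j] = matrix[i][j]
-- 	return res[-1]
-- ===== SOURCE B (Python) =====
-- def MaxMinPath(matrix):
--     # Top-down memoized recursion instead of A's in-place row-sweep DP.
--     memo = {}
--
--     def f(i, j):
--         key = (i, j)
--         if key in memo:
--             return memo[key]
--         if i == 0:
--             v = matrix[0][0] if j == 0 else min(matrix[0][j], f(0, j - 1))
--         elif j == 0:
--             v = min(matrix[i][0], f(i - 1, 0))
--         else:
--             v = min(matrix[i][j], max(f(i - 1, j), f(i, j - 1)))
--         memo[key] = v
--         return v
--
--     return f(len(matrix) - 1, len(matrix[0]) - 1)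
-- ===== Notes on version B (the rewrite author's own statement) =====
-- stated objective: alternative
-- what changed: B replaces A's iterative in-place row-array DP (with its conditional max/else rewrite) by top-down memoized recursion: a dict-cached helper f(i,j) = min(cell, max/min of its up and left predecessors) evaluated on demand from the bottom-right target cell.
import Mathlib
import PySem

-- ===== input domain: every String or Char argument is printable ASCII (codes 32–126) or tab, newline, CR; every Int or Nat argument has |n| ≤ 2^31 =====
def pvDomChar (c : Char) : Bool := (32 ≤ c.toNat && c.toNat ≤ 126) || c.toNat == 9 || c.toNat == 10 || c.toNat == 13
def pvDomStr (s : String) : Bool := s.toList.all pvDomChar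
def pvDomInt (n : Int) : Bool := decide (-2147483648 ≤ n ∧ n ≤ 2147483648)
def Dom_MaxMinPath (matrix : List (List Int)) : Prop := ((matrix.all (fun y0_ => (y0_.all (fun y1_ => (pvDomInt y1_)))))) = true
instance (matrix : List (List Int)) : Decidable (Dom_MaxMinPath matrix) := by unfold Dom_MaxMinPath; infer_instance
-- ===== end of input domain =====

-- B replaces A's in-place row-sweep DP by top-down memoized recursion from the target cell
-- (a dict-cached recursive helper); the equivalence is about the return value only.

-- ===== PORT A =====
def MaxMinPath (matrix : List (List Int)) : Int :=
  let row0 := (PySem.List.pyGet? matrix 0).getD []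
  let w := row0.length
  let res0 := PySem.List.pySetD (List.replicate w 0) 0 (PySem.List.pyGetD row0 0 0)
  let res1 := (PySem.List.pyRange 1 (w : Int) 1).foldl
      (fun res i => PySem.List.pySetD res i
        (min (PySem.List.pyGetD res (i - 1) 0) (PySem.List.pyGetD row0 i 0))) res0
  let resF := (PySem.List.pyRange 1 (matrix.length : Int) 1).foldl
      (fun res i =>
        (PySem.List.pyRange 1 (w : Int) 1).foldl
          (fun r j =>
            if PySem.List.pyGetD r j 0 < PySem.List.pyGetD ((PySem.List.pyGet? matrix i).getD []) j 0 ∧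
                PySem.List.pyGetD r (j - 1) 0 < PySem.List.pyGetD ((PySem.List.pyGet? matrix i).getD []) j 0 then
              PySem.List.pySetD r j (max (PySem.List.pyGetD r j 0) (PySem.List.pyGetD r (j - 1) 0))
            else
              PySem.List.pySetD r j (PySem.List.pyGetD ((PySem.List.pyGet? matrix i).getD []) j 0))
          (PySem.List.pySetD res 0
            (min (PySem.List.pyGetD ((PySem.List.pyGet? matrix i).getD []) 0 0) (PySem.List.pyGetD res 0 0)))) res1
  PySem.List.pyGetD resF (-1) 0

-- ===== PORT B =====
-- matrix[i][j] for the nonnegative indices B's recursion uses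
def bCell (m : List (List Int)) (i j : Nat) : Int :=
  PySem.List.pyGetD ((PySem.List.pyGet? m (i : Int)).getD []) (j : Int) 0

-- B's memoized helper f(i, j): returns its value and the updated memo dict
def bF (m : List (List Int)) : Nat → Nat → PySem.Dict (Int × Int) Int → Int × PySem.Dict (Int × Int) Int
  | i, j, memo =>
    match memo.get? ((i : Int), (j : Int)) with
    | some v => (v, memo)
    | none =>
      if hi : i = 0 then
        if hj : j = 0 then
          let v := bCell m 0 0
          (v, memo.insert ((i : Int), (j : Int)) v)
        else
          let p := bF m 0 (j - 1) memo
          let v := min (bCell m 0 j) p.1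
          (v, p.2.insert ((i : Int), (j : Int)) v)
      else if hj : j = 0 then
        let p := bF m (i - 1) 0 memo
        let v := min (bCell m i 0) p.1
        (v, p.2.insert ((i : Int), (j : Int)) v)
      else
        let p := bF m (i - 1) j memo
        let q := bF m i (j - 1) p.2
        let v := min (bCell m i j) (max p.1 q.1)
        (v, q.2.insert ((i : Int), (j : Int)) v)
termination_by i j _ => i + j
decreasing_by all_goals omega

def MaxMinPath_alt (matrix : List (List Int)) : Int :=
  (bF matrix (matrix.length - 1) (((PySem.List.pyGet? matrix 0).getD []).length - 1)
      PySem.Dict.empty).1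

-- ===== PRECONDITION & SPEC =====
-- Pre_ excludes exactly the inputs on which Python A raises IndexError: empty matrix,
-- empty first row, or some row shorter than the first row.
def Pre_MaxMinPath (matrix : List (List Int)) : Prop :=
  matrix ≠ [] ∧ matrix.headD [] ≠ [] ∧
    ∀ row ∈ matrix, (matrix.headD []).length ≤ row.length
instance (matrix : List (List Int)) : Decidable (Pre_MaxMinPath matrix) := by
  unfold Pre_MaxMinPath; infer_instance
def pvWitness_MaxMinPath : List (List Int) := [[3, 1], [2, 5]]

def Spec_MaxMinPath (matrix : List (List Int)) (out : Int) : Prop := out = MaxMinPath_alt matrix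
instance (matrix : List (List Int)) (out : Int) : Decidable (Spec_MaxMinPath matrix out) := by unfold Spec_MaxMinPath; infer_instance

-- ===== CLAIM (what is proved, stated in full; the proofs are below) =====
def Claim_equal_MaxMinPath : Prop := ∀ (matrix : List (List Int)), Dom_MaxMinPath matrix → Pre_MaxMinPath matrix → Spec_MaxMinPath matrix (MaxMinPath matrix)

-- ===== LEMMAS AND PROOFS =====

-- the cell (i, j) of the grid, total form
def cell (m : List (List Int)) (i j : Nat) : Int := (m.getD i []).getD j 0

-- the max-min-path recurrence both programs compute
def mmp (m : List (List Int)) : Nat → Nat → Int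
  | 0, 0 => cell m 0 0
  | 0, j + 1 => min (mmp m 0 j) (cell m 0 (j + 1))
  | i + 1, 0 => min (cell m (i + 1) 0) (mmp m i 0)
  | i + 1, j + 1 => min (cell m (i + 1) (j + 1)) (max (mmp m i (j + 1)) (mmp m (i + 1) j))
termination_by i j => i + j

theorem pyGet?_getD_natCast {α : Type} (xs : List α) (i : Nat) (d : α) :
    (PySem.List.pyGet? xs (i : Int)).getD d = xs.getD i d := by
  simp only [PySem.List.pyGet?, PySem.List.pyIdx?]
  rw [if_pos (by positivity)]
  by_cases h : i < xs.length
  · simp [h, List.getD]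
  · rw [List.getD, List.getElem?_eq_none (by omega : xs.length ≤ i)]
    simp [h]

theorem pyGet?_getD_zero {α : Type} (xs : List α) (d : α) :
    (PySem.List.pyGet? xs (0 : Int)).getD d = xs.getD 0 d := by
  simpa using pyGet?_getD_natCast xs 0 d

theorem set_if_min_max (l : List Int) (k : Nat) (a b c : Int) :
    (if a < c ∧ b < c then l.set k (max a b) else l.set k c) = l.set k (min c (max a b)) := by
  split_ifs with h <;> (congr 1; omega)

theorem getD_set_int (l : List Int) (i j : Nat) (v : Int) (hi : i < l.length) :
    (l.set i v).getD j 0 = if j = i then v else l.getD j 0 := by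
  simp only [List.getD, List.getElem?_set, hi, if_true]
  rcases eq_or_ne i j with h | h
  · subst h; simp
  · simp [h, Ne.symm h]

-- pointwise invariant for A's res array
def InvA (w : Nat) (l : List Int) (P : Nat → Int) : Prop :=
  l.length = w ∧ ∀ j < w, l.getD j 0 = P j

-- A's first-row loop
theorem A_first (m : List (List Int)) (row0 : List Int) (w : Nat)
    (hrow0 : row0 = m.getD 0 []) (_hw : row0.length = w) (hw1 : 1 ≤ w) :
    ∀ k, 1 ≤ k → k ≤ w →
      InvA w ((PySem.List.pyRange 1 (k : Int) 1).foldl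
        (fun res i => PySem.List.pySetD res i
          (min (PySem.List.pyGetD res (i - 1) 0) (PySem.List.pyGetD row0 i 0)))
        (PySem.List.pySetD (List.replicate w 0) 0 (PySem.List.pyGetD row0 0 0)))
        (fun j => if j < k then mmp m 0 j else 0) := by
  intro k
  induction k with
  | zero => intro h1 _; exact absurd h1 (by omega)
  | succ k ih =>
    intro _ hk1
    by_cases hk : 1 ≤ k
    · have prev := ih hk (by omega)
      obtain ⟨hlen, hP⟩ := prev
      beta_reduce at hP
      rw [show (((k + 1 : Nat)) : Int) = ((k : Int)) + 1 by push_cast; ring,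
          PySem.List.pyRange_one_succ_right (by exact_mod_cast hk), List.foldl_append,
          List.foldl_cons, List.foldl_nil]
      rw [show ((k : Int) - 1) = (((k - 1 : Nat)) : Int) by omega]
      simp only [PySem.List.pySetD_natCast, PySem.List.pyGetD_natCast]
      refine ⟨by simpa using hlen, ?_⟩
      intro j hj
      beta_reduce
      rw [getD_set_int _ _ _ _ (by omega)]
      rcases eq_or_ne j k with hjk | hjk
      · subst hjk
        rw [if_pos rfl, if_pos (by omega), hP (j - 1) (by omega), if_pos (by omega),
            show (j : Nat) = (j - 1) + 1 by omega]
        simp only [mmp, cell, hrow0]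
        rfl
      · rw [if_neg hjk, hP j hj]
        rcases lt_or_ge j k with h | h
        · rw [if_pos h, if_pos (by omega)]
        · rw [if_neg (by omega), if_neg (by omega)]
    · have hk0 : k = 0 := by omega
      subst hk0
      rw [show (((0 + 1 : Nat)) : Int) = 1 by norm_num, PySem.List.pyRange_one_eq_nil le_rfl,
          List.foldl_nil, PySem.List.pySetD_of_nonneg _ _ le_rfl]
      refine ⟨by simp, ?_⟩
      intro j hj
      beta_reduce
      rw [show ((0 : Int).toNat) = 0 by simp, getD_set_int _ _ _ _ (by simpa using (by omega : 0 < w))]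
      rcases eq_or_ne j 0 with hj0 | hj0
      · subst hj0
        rw [if_pos rfl, if_pos (by omega), PySem.List.pyGetD_zero]
        simp only [mmp, cell, hrow0]
      · rw [if_neg hj0, if_neg (by omega)]
        simp

theorem getLast_eq_getD (l : List Int) (h : l ≠ []) : l.getLast h = l.getD (l.length - 1) 0 := by
  rw [List.getLast_eq_getElem]
  rw [List.getD_eq_getElem l 0 (by simp [List.length_pos_iff.mpr h])]

-- A's first-row loop, final form
theorem A_first' (m : List (List Int)) (row0 : List Int) (w : Nat)
    (hrow0 : row0 = m.getD 0 []) (hw : row0.length = w) (hw1 : 1 ≤ w) :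
    InvA w ((PySem.List.pyRange 1 (w : Int) 1).foldl
        (fun res i => PySem.List.pySetD res i
          (min (PySem.List.pyGetD res (i - 1) 0) (PySem.List.pyGetD row0 i 0)))
        (PySem.List.pySetD (List.replicate w 0) 0 (PySem.List.pyGetD row0 0 0)))
        (fun j => mmp m 0 j) := by
  obtain ⟨hl, hp⟩ := A_first m row0 w hrow0 hw hw1 w hw1 le_rfl
  refine ⟨hl, fun j hj => ?_⟩
  rw [hp j hj]
  beta_reduce
  rw [if_pos hj]

-- A's inner (row) loop
theorem A_row (m : List (List Int)) (rowi res : List Int) (w p : Nat)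
    (hrowi : rowi = m.getD (p + 1) []) (hw1 : 1 ≤ w)
    (h : InvA w res (fun j => mmp m p j)) :
    ∀ k, 1 ≤ k → k ≤ w →
      InvA w ((PySem.List.pyRange 1 (k : Int) 1).foldl
        (fun r j =>
          if PySem.List.pyGetD r j 0 < PySem.List.pyGetD rowi j 0 ∧
              PySem.List.pyGetD r (j - 1) 0 < PySem.List.pyGetD rowi j 0 then
            PySem.List.pySetD r j (max (PySem.List.pyGetD r j 0) (PySem.List.pyGetD r (j - 1) 0))
          else
            PySem.List.pySetD r j (PySem.List.pyGetD rowi j 0))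
        (PySem.List.pySetD res 0
          (min (PySem.List.pyGetD rowi 0 0) (PySem.List.pyGetD res 0 0))))
        (fun j => if j < k then mmp m (p + 1) j else mmp m p j) := by
  obtain ⟨hlen, hP⟩ := h
  beta_reduce at hP
  intro k
  induction k with
  | zero => intro h1 _; exact absurd h1 (by omega)
  | succ k ih =>
    intro _ hk1
    by_cases hk : 1 ≤ k
    · obtain ⟨hlen', hP'⟩ := ih hk (by omega)
      beta_reduce at hP'
      rw [show (((k + 1 : Nat)) : Int) = ((k : Int)) + 1 by push_cast; ring,
          PySem.List.pyRange_one_succ_right (by exact_mod_cast hk), List.foldl_append,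
          List.foldl_cons, List.foldl_nil]
      simp only [show ((k : Int) - 1) = (((k - 1 : Nat)) : Int) by omega,
        PySem.List.pySetD_natCast, PySem.List.pyGetD_natCast]
      rw [set_if_min_max]
      refine ⟨by simpa using hlen', ?_⟩
      intro j hj
      beta_reduce
      rw [getD_set_int _ _ _ _ (by omega)]
      rcases eq_or_ne j k with hjk | hjk
      · subst hjk
        rw [if_pos rfl, if_pos (by omega), hP' j (by omega), hP' (j - 1) (by omega),
            if_neg (by omega), if_pos (by omega),
            show (j : Nat) = (j - 1) + 1 by omega]
        simp only [mmp, cell, hrowi]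
        rw [show (j - 1) + 1 = j by omega]
      · rw [if_neg hjk, hP' j hj]
        rcases lt_or_ge j k with hlt | hge
        · rw [if_pos hlt, if_pos (by omega)]
        · rw [if_neg (by omega), if_neg (by omega)]
    · have hk0 : k = 0 := by omega
      subst hk0
      rw [show (((0 + 1 : Nat)) : Int) = 1 by norm_num, PySem.List.pyRange_one_eq_nil le_rfl,
          List.foldl_nil, PySem.List.pySetD_of_nonneg _ _ le_rfl]
      refine ⟨by simpa using hlen, ?_⟩
      intro j hj
      beta_reduce
      rw [show ((0 : Int).toNat) = 0 by simp, getD_set_int _ _ _ _ (by omega)]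
      rcases eq_or_ne j 0 with hj0 | hj0
      · subst hj0
        rw [if_pos rfl, if_pos (by omega), PySem.List.pyGetD_zero, PySem.List.pyGetD_zero,
            hP 0 (by omega)]
        simp only [mmp, cell, hrowi]
      · rw [if_neg hj0, if_neg (by omega), hP j hj]

-- A's outer loop
theorem A_outer (m : List (List Int)) (res1 : List Int) (w : Nat) (hw1 : 1 ≤ w)
    (h1 : InvA w res1 (fun j => mmp m 0 j)) :
    ∀ i, 1 ≤ i → i ≤ m.length →
      InvA w ((PySem.List.pyRange 1 (i : Int) 1).foldl
        (fun res i =>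
          (PySem.List.pyRange 1 (w : Int) 1).foldl
            (fun r j =>
              if PySem.List.pyGetD r j 0 < PySem.List.pyGetD ((PySem.List.pyGet? m i).getD []) j 0 ∧
                  PySem.List.pyGetD r (j - 1) 0 < PySem.List.pyGetD ((PySem.List.pyGet? m i).getD []) j 0 then
                PySem.List.pySetD r j (max (PySem.List.pyGetD r j 0) (PySem.List.pyGetD r (j - 1) 0))
              else
                PySem.List.pySetD r j (PySem.List.pyGetD ((PySem.List.pyGet? m i).getD []) j 0))
            (PySem.List.pySetD res 0
              (min (PySem.List.pyGetD ((PySem.List.pyGet? m i).getD []) 0 0) (PySem.List.pyGetD res 0 0)))) res1)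
        (fun j => mmp m (i - 1) j) := by
  intro i
  induction i with
  | zero => intro h1 _; exact absurd h1 (by omega)
  | succ i ih =>
    intro _ hi1
    by_cases hi : 1 ≤ i
    · have prev := ih hi (by omega)
      rw [show (((i + 1 : Nat)) : Int) = ((i : Int)) + 1 by push_cast; ring,
          PySem.List.pyRange_one_succ_right (by exact_mod_cast hi), List.foldl_append,
          List.foldl_cons, List.foldl_nil]
      have hrowi : ((PySem.List.pyGet? m (i : Int)).getD []) = m.getD ((i - 1) + 1) [] := by
        rw [pyGet?_getD_natCast, show (i - 1) + 1 = i by omega]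
      have hrow := A_row m ((PySem.List.pyGet? m (i : Int)).getD []) _ w (i - 1) hrowi hw1
        prev w hw1 le_rfl
      obtain ⟨hl, hp⟩ := hrow
      refine ⟨hl, ?_⟩
      intro j hj
      rw [hp j hj]
      beta_reduce
      rw [if_pos hj, show (i - 1) + 1 = i by omega, show (i + 1) - 1 = i by omega]
    · have hi0 : i = 0 := by omega
      subst hi0
      rw [show (((0 + 1 : Nat)) : Int) = 1 by norm_num, PySem.List.pyRange_one_eq_nil le_rfl,
          List.foldl_nil]
      simpa using h1

theorem A_val (m : List (List Int)) (hm : m ≠ [])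
    (hw1 : 1 ≤ (m.headD []).length)
    (hrows : ∀ row ∈ m, (m.headD []).length ≤ row.length) :
    MaxMinPath m = mmp m (m.length - 1) ((m.headD []).length - 1) := by
  have hm1 : 1 ≤ m.length := by cases m with | nil => exact absurd rfl hm | cons a l => simp
  have hhead : m.headD [] = m.getD 0 [] := by cases m <;> simp
  have hrow0 : ((PySem.List.pyGet? m (0 : Int)).getD ([] : List Int)) = m.getD 0 [] :=
    pyGet?_getD_zero m []
  simp only [MaxMinPath]
  have hw' : ((PySem.List.pyGet? m (0 : Int)).getD ([] : List Int)).length = (m.headD []).length := by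
    rw [hrow0, hhead]
  have hw1' : 1 ≤ ((PySem.List.pyGet? m (0 : Int)).getD ([] : List Int)).length := by omega
  have h1' := A_first' m ((PySem.List.pyGet? m (0 : Int)).getD ([] : List Int)) _ hrow0 rfl hw1'
  have hF := A_outer m _ _ hw1' h1' m.length hm1 le_rfl
  obtain ⟨hlen, hp⟩ := hF
  rw [PySem.List.pyGetD_neg_one]
  · rw [getLast_eq_getD, hlen, hp _ (by omega), hw']
  · intro hcon
    rw [hcon] at hlen
    simp at hlen
    omega

-- B-side: bCell is the total cell accessor
theorem bCell_eq_cell (m : List (List Int)) (i j : Nat) : bCell m i j = cell m i j := by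
  rw [bCell, cell, pyGet?_getD_natCast, PySem.List.pyGetD_natCast]

-- memo-correctness invariant for B's dict
def Good (m : List (List Int)) (memo : PySem.Dict (Int × Int) Int) : Prop :=
  ∀ (i j : Nat) (v : Int), memo.get? ((i : Int), (j : Int)) = some v → v = mmp m i j

theorem good_empty (m : List (List Int)) : Good m PySem.Dict.empty := by
  intro i j v h
  rw [PySem.Dict.get?_empty] at h
  exact absurd h (by simp)

theorem good_insert (m : List (List Int)) (memo : PySem.Dict (Int × Int) Int)
    (i j : Nat) (v : Int) (h : Good m memo) (hv : v = mmp m i j) :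
    Good m (memo.insert ((i : Int), (j : Int)) v) := by
  intro i' j' w hw
  rw [PySem.Dict.get?_insert] at hw
  split_ifs at hw with hk
  · obtain ⟨h1, h2⟩ := Prod.mk.injEq .. ▸ hk
    have : i' = i := by exact_mod_cast h1
    have : j' = j := by exact_mod_cast h2
    simp_all
  · exact h i' j' w hw

-- the memoized recursion computes the recurrence and keeps the memo correct
theorem bF_correct (m : List (List Int)) :
    ∀ (N i j : Nat) (memo : PySem.Dict (Int × Int) Int), i + j < N → Good m memo →
      (bF m i j memo).1 = mmp m i j ∧ Good m (bF m i j memo).2 := by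
  intro N
  induction N with
  | zero => intro i j memo h _; exact absurd h (by omega)
  | succ N ih =>
    intro i j memo hN hgood
    rw [bF]
    cases hget : memo.get? ((i : Int), (j : Int)) with
    | some v => exact ⟨hgood i j v hget, hgood⟩
    | none =>
      by_cases hi : i = 0
      · by_cases hj : j = 0
        · subst hi; subst hj
          have h00 : mmp m 0 0 = cell m 0 0 := by simp [mmp]
          refine ⟨by simp [bCell_eq_cell, h00], ?_⟩
          have hgi : Good m (memo.insert ((0 : Int), (0 : Int)) (bCell m 0 0)) :=
            good_insert m memo 0 0 _ hgood (by rw [bCell_eq_cell, h00])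
          simpa using hgi
        · subst hi
          simp only [dif_neg hj]
          simp only [dite_eq_ite, if_true]
          obtain ⟨hv, hg⟩ := ih 0 (j - 1) memo (by omega) hgood
          have hval : min (bCell m 0 j) (bF m 0 (j - 1) memo).1 = mmp m 0 j := by
            rw [hv, bCell_eq_cell, show j = (j - 1) + 1 by omega, mmp]
            exact min_comm _ _
          exact ⟨hval, good_insert m _ 0 j _ hg hval⟩
      · by_cases hj : j = 0
        · subst hj
          simp only [dif_neg hi]
          simp only [dite_eq_ite, if_true]
          obtain ⟨hv, hg⟩ := ih (i - 1) 0 memo (by omega) hgood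
          have hval : min (bCell m i 0) (bF m (i - 1) 0 memo).1 = mmp m i 0 := by
            rw [hv, bCell_eq_cell, show (i : Nat) = (i - 1) + 1 by omega, mmp,
                show i - 1 + 1 - 1 = i - 1 by omega]
          exact ⟨hval, good_insert m _ i 0 _ hg hval⟩
        · simp only [dif_neg hi, dif_neg hj]
          obtain ⟨hv1, hg1⟩ := ih (i - 1) j memo (by omega) hgood
          obtain ⟨hv2, hg2⟩ := ih i (j - 1) (bF m (i - 1) j memo).2 (by omega) hg1
          have hval : min (bCell m i j) (max (bF m (i - 1) j memo).1
              (bF m i (j - 1) (bF m (i - 1) j memo).2).1) = mmp m i j := by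
            rw [hv1, hv2, bCell_eq_cell,
                show (i : Nat) = (i - 1) + 1 by omega, show (j : Nat) = (j - 1) + 1 by omega, mmp]
            rw [show (i - 1) + 1 = i by omega, show (j - 1) + 1 = j by omega]
          exact ⟨hval, good_insert m _ i j _ hg2 hval⟩

theorem B_val (m : List (List Int)) :
    MaxMinPath_alt m = mmp m (m.length - 1) ((m.headD []).length - 1) := by
  have hhead : m.headD [] = m.getD 0 [] := by cases m <;> simp
  have hrow0 : ((PySem.List.pyGet? m (0 : Int)).getD ([] : List Int)) = m.getD 0 [] :=
    pyGet?_getD_zero m []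
  simp only [MaxMinPath_alt]
  rw [hrow0, ← hhead]
  exact (bF_correct m (m.length + (m.headD []).length + 1) _ _ _ (by omega) (good_empty m)).1

-- ===== VERDICT (by name: the statement is the Claim_ definition above) =====
theorem MaxMinPath_spec : Claim_equal_MaxMinPath := by
  intro m _ hpre
  obtain ⟨hm, hh, hrows⟩ := hpre
  have hw1 : 1 ≤ (m.headD []).length := List.length_pos_iff.mpr hh
  unfold Spec_MaxMinPath
  rw [A_val m hm hw1 hrows, B_val m]
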